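-- pv_equiv track=rewrite | github.com/cxw951109/TY_RMS_BZP_Manage_zhejingjikong1 | Business/BllMedicament.py | get_lig
-- ===== SOURCE A (Python) =====
-- def get_lig(null_place,ClientUseCode):
--     re_list =[]
--     temp_list =[int(i) for i in null_place]
--     if ClientUseCode == "HC9":
--         re =any([0 < i < 13 for i in temp_list])
--         if re:
--             re_list.append("49")
--         re1 =any([12 < i < 25 for i in temp_list])
--         if re1:
--             re_list.append("50")
--         re2 =any([24 < i < 37 for i in temp_list])
--         if re2:
--             re_list.append("51")
--         re3 =any([36 < i < 49 for i in temp_list])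
--         if re3:
--             re_list.append("52")
--     else:
--         re =any([0 < i < 31 for i in temp_list])
--         if re:
--             re_list.append("181")
--         re1 =any([30 < i < 61 for i in temp_list])
--         if re1:
--             re_list.append("182")
--         re2 =any([60 < i < 91 for i in temp_list])
--         if re2:
--             re_list.append("183")
--         re3 =any([90 < i < 121 for i in temp_list])
--         if re3:
--             re_list.append("184")
--         re4 =any([120 < i < 151 for i in temp_list])
--         if re4:
--             re_list.append("185")
--     return re_list
-- ===== SOURCE B (Python) =====
-- def get_lig(null_place, ClientUseCode):
--     if ClientUseCode == "HC9":
--         div, labels = 12, ["49", "50", "51", "52"]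
--     else:
--         div, labels = 30, ["181", "182", "183", "184", "185"]
--     seen = set()
--     for v in null_place:
--         i = int(v)
--         if 1 <= i <= len(labels) * div:
--             seen.add((i - 1) // div)
--     return [lab for idx, lab in enumerate(labels) if idx in seen]
-- ===== Notes on version B (the rewrite author's own statement) =====
-- stated objective: faster
-- what changed: Replaces the nine hand-written per-range any() scans with a single pass that buckets each value by integer division into a seen-set, then emits the labels whose bucket was hit.
import Mathlib
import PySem

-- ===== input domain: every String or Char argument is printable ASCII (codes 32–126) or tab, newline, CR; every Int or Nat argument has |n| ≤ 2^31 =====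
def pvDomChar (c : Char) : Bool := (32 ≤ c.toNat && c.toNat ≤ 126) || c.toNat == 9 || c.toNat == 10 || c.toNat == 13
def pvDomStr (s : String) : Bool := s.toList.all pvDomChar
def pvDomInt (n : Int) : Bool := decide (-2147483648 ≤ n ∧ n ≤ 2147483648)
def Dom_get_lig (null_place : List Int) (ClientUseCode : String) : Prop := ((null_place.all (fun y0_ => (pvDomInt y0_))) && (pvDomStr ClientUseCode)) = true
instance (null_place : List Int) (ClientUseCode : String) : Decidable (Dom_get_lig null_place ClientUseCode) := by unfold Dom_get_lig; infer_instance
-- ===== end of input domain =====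

-- B replaces the nine per-range any() scans by one bucketing pass ((i-1)//div into a seen-set)
-- followed by emitting the labels whose bucket was hit; equivalence is proved on all inputs.

-- ===== PORT A =====
def get_lig (null_place : List Int) (ClientUseCode : String) : List String :=
  let re_list : List String := []
  let temp_list : List Int := null_place.map (fun i => i)   -- int(i) is the identity on ints
  if ClientUseCode == "HC9" then
    let re := temp_list.any (fun i => decide (0 < i) && decide (i < 13))
    let re_list := if re then re_list ++ ["49"] else re_list
    let re1 := temp_list.any (fun i => decide (12 < i) && decide (i < 25))
    let re_list := if re1 then re_list ++ ["50"] else re_list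
    let re2 := temp_list.any (fun i => decide (24 < i) && decide (i < 37))
    let re_list := if re2 then re_list ++ ["51"] else re_list
    let re3 := temp_list.any (fun i => decide (36 < i) && decide (i < 49))
    let re_list := if re3 then re_list ++ ["52"] else re_list
    re_list
  else
    let re := temp_list.any (fun i => decide (0 < i) && decide (i < 31))
    let re_list := if re then re_list ++ ["181"] else re_list
    let re1 := temp_list.any (fun i => decide (30 < i) && decide (i < 61))
    let re_list := if re1 then re_list ++ ["182"] else re_list
    let re2 := temp_list.any (fun i => decide (60 < i) && decide (i < 91))
    let re_list := if re2 then re_list ++ ["183"] else re_list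
    let re3 := temp_list.any (fun i => decide (90 < i) && decide (i < 121))
    let re_list := if re3 then re_list ++ ["184"] else re_list
    let re4 := temp_list.any (fun i => decide (120 < i) && decide (i < 151))
    let re_list := if re4 then re_list ++ ["185"] else re_list
    re_list

-- ===== PORT B =====
def get_lig_alt (null_place : List Int) (ClientUseCode : String) : List String :=
  let p : Int × List String :=
    if ClientUseCode == "HC9" then (12, ["49", "50", "51", "52"])
    else (30, ["181", "182", "183", "184", "185"])
  let div := p.1
  let labels := p.2
  let seen : PySem.Set Int := null_place.foldl (fun s v =>
      if 1 ≤ v ∧ v ≤ (labels.length : Int) * div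
      then PySem.Set.add s (PySem.Int.floordiv (v - 1) div) else s)
    PySem.Set.empty
  ((PySem.List.enumerate labels).filter (fun x => decide ((x.1 : Int) ∈ seen))).map (fun x => x.2)

-- ===== PRECONDITION & SPEC =====
def Spec_get_lig (null_place : List Int) (ClientUseCode : String) (out : List String) : Prop := out = get_lig_alt null_place ClientUseCode
instance (null_place : List Int) (ClientUseCode : String) (out : List String) : Decidable (Spec_get_lig null_place ClientUseCode out) := by unfold Spec_get_lig; infer_instance

-- ===== CLAIM (what is proved, stated in full; the proofs are below) =====
def Claim_equal_get_lig : Prop := ∀ (null_place : List Int) (ClientUseCode : String), Dom_get_lig null_place ClientUseCode → Spec_get_lig null_place ClientUseCode (get_lig null_place ClientUseCode)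

-- ===== LEMMAS AND PROOFS =====

lemma mem_foldl_guard_add (l : List Int) (P : Int → Prop) [DecidablePred P] (f : Int → Int)
    (s0 : PySem.Set Int) (x : Int) :
    (x ∈ l.foldl (fun s v => if P v then PySem.Set.add s (f v) else s) s0) ↔
      x ∈ s0 ∨ ∃ v ∈ l, P v ∧ f v = x := by
  induction l generalizing s0 with
  | nil => simp
  | cons a t ih =>
    simp only [List.foldl_cons, ih]
    by_cases h : P a
    · simp only [if_pos h, PySem.Set.mem_add, List.mem_cons]
      constructor
      · rintro (⟨hs | he⟩ | ⟨v, hv, hP, hf⟩)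
        · exact .inl hs
        · exact .inr ⟨a, .inl rfl, h, he.symm⟩
        · exact .inr ⟨v, .inr hv, hP, hf⟩
      · rintro (hs | ⟨v, (rfl | hv), hP, hf⟩)
        · exact .inl (.inl hs)
        · exact .inl (.inr hf.symm)
        · exact .inr ⟨v, hv, hP, hf⟩
    · simp only [if_neg h, List.mem_cons]
      constructor
      · rintro (hs | ⟨v, hv, hP, hf⟩)
        · exact .inl hs
        · exact .inr ⟨v, .inr hv, hP, hf⟩
      · rintro (hs | ⟨v, (rfl | hv), hP, hf⟩)
        · exact .inl hs
        · exact absurd hP h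
        · exact .inr ⟨v, hv, hP, hf⟩

lemma bucket_iff (l : List Int) (bnd d k lo hi : Int)
    (h : ∀ v : Int, ((1 ≤ v ∧ v ≤ bnd) ∧ (v - 1) / d = k) ↔ (lo < v ∧ v < hi)) :
    (k ∈ l.foldl (fun s v => if 1 ≤ v ∧ v ≤ bnd then PySem.Set.add s ((v - 1) / d) else s) []) ↔
      ∃ x ∈ l, lo < x ∧ x < hi := by
  rw [mem_foldl_guard_add l (fun v => 1 ≤ v ∧ v ≤ bnd) (fun v => (v - 1) / d) [] k]
  simp only [List.not_mem_nil, false_or]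
  exact exists_congr fun v => and_congr_right fun _ => h v


lemma get_lig_eq (null_place : List Int) (ClientUseCode : String) :
    get_lig null_place ClientUseCode = get_lig_alt null_place ClientUseCode := by
  by_cases hc : (ClientUseCode == "HC9") = true
  · simp only [get_lig, get_lig_alt, hc, if_true]
    simp only [PySem.List.enumerate, List.length_cons, List.length_nil, List.filter_cons,
      List.filter_nil]
    norm_num [List.any_eq_true]
    simp only [bucket_iff null_place 48 12 0 0 13 (fun v => by omega),
      bucket_iff null_place 48 12 1 12 25 (fun v => by omega),
      bucket_iff null_place 48 12 2 24 37 (fun v => by omega),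
      bucket_iff null_place 48 12 3 36 49 (fun v => by omega)]
    split_ifs <;> simp
  · simp only [get_lig, get_lig_alt, hc, if_false, Bool.false_eq_true]
    simp only [PySem.List.enumerate, List.length_cons, List.length_nil, List.filter_cons,
      List.filter_nil]
    norm_num [List.any_eq_true]
    simp only [bucket_iff null_place 150 30 0 0 31 (fun v => by omega),
      bucket_iff null_place 150 30 1 30 61 (fun v => by omega),
      bucket_iff null_place 150 30 2 60 91 (fun v => by omega),
      bucket_iff null_place 150 30 3 90 121 (fun v => by omega),
      bucket_iff null_place 150 30 4 120 151 (fun v => by omega)]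
    split_ifs <;> simp

-- ===== VERDICT (by name: the statement is the Claim_ definition above) =====
theorem get_lig_spec : Claim_equal_get_lig := by
  intro null_place ClientUseCode _
  exact get_lig_eq null_place ClientUseCode
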